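-- pv_equiv track=rewrite | github.com/bca44/cs110 | Unit5/lab5d/group_by_first_two_letters.py | group_by_first_two_letters
-- ===== SOURCE A (Python) =====
-- def group_by_first_two_letters(words):
--     """
--     Group a list of words by their first two letters.
--
--     words -> a list of strings
--
--     returns a dictionary that maps a letter to a list of words
--     """
--     two_letters_dict = {}
--
--     for word in words:
--         key = word[0:2]
--
--         if key not in two_letters_dict:
--             two_letters_dict[key] = []
--
--         two_letters_dict[key].append(word)
--
--     return two_letters_dict
-- ===== SOURCE B (Python) =====
-- def group_by_first_two_letters(words):
--     keys = list(dict.fromkeys(word[0:2] for word in words))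
--     return {key: [word for word in words if word[0:2] == key] for key in keys}
-- ===== Notes on version B (the rewrite author's own statement) =====
-- stated objective: alternative
-- what changed: Replaces A's single-pass dict accumulation (create-then-append per word) with an ordered dedup of the two-letter keys followed by a per-key filter comprehension over the whole list.
import Mathlib
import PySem

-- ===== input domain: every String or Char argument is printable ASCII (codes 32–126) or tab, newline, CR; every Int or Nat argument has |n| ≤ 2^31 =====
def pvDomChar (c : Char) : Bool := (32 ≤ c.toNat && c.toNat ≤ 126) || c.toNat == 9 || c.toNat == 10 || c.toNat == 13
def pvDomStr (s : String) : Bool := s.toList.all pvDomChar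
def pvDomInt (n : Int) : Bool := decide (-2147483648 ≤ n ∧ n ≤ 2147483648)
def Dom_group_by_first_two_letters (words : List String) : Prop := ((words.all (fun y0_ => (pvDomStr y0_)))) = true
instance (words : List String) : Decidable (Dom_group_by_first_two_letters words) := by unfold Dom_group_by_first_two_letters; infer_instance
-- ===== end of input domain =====

-- B replaces A's single-pass dict accumulation with an ordered dedup of the keys
-- followed by a per-key filter over the whole list (objective: alternative).

-- word[0:2], shared by both ports
def gkey (w : String) : String := PySem.Str.slice w (some 0) (some 2)

-- ===== PORT A =====
def group_by_first_two_letters (words : List String) : List (String × List String) :=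
  (words.foldl (fun d word =>
      let key := gkey word
      let d := if d.contains key then d else d.insert key ([] : List String)
      d.modify key [] (fun l => l ++ [word]))
    (PySem.Dict.empty : PySem.Dict String (List String))).items

-- ===== PORT B =====
def group_by_first_two_letters_alt (words : List String) : List (String × List String) :=
  let keys := PySem.List.dedup (words.map gkey)
  keys.map (fun key => (key, words.filter (fun word => gkey word == key)))

-- ===== PRECONDITION & SPEC =====
def Spec_group_by_first_two_letters (words : List String) (out : List (String × List String)) : Prop := out = group_by_first_two_letters_alt words
instance (words : List String) (out : List (String × List String)) : Decidable (Spec_group_by_first_two_letters words out) := by unfold Spec_group_by_first_two_letters; infer_instance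

-- ===== CLAIM (what is proved, stated in full; the proofs are below) =====
def Claim_equal_group_by_first_two_letters : Prop := ∀ (words : List String), Dom_group_by_first_two_letters words → Spec_group_by_first_two_letters words (group_by_first_two_letters words)

-- ===== LEMMAS AND PROOFS =====

-- the (key, group-so-far) entry for key k after processing prefix q
def Fent (q : List String) (k : String) : String × List String :=
  (k, q.filter (fun word => gkey word == k))

-- A's loop body
def stepA (d : PySem.Dict String (List String)) (word : String) : PySem.Dict String (List String) :=
  let key := gkey word
  let d := if d.contains key then d else d.insert key ([] : List String)
  d.modify key [] (fun l => l ++ [word])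

lemma contains_map_Fent (K q : List String) (k : String) :
    (PySem.Dict.mk (K.map (Fent q))).contains k = K.contains k := by
  simp only [PySem.Dict.contains, PySem.Dict.items, List.any_map]
  by_cases hm : k ∈ K
  · rw [List.contains_iff_mem.mpr hm, List.any_eq_true]
    exact ⟨k, hm, by simp [Fent]⟩
  · have h1 : K.contains k = false := by
      rw [Bool.eq_false_iff]
      exact fun hc => hm (List.contains_iff_mem.mp hc)
    rw [h1, List.any_eq_false]
    intro x hx
    simp only [Function.comp_apply, Fent, beq_iff_eq]
    exact fun e => hm (e ▸ hx)

lemma getD_map_Fent_mem (K q : List String) (k : String) (hk : k ∈ K) :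
    (PySem.Dict.mk (K.map (Fent q))).getD k [] = q.filter (fun word => gkey word == k) := by
  have hsome : (List.find? (fun x => x == k) K).isSome = true :=
    List.find?_isSome.mpr ⟨k, hk, by simp⟩
  obtain ⟨a, ha⟩ := Option.isSome_iff_exists.mp hsome
  have hak : a = k := by have := List.find?_some ha; simpa using this
  have hfind : List.find? (fun p => p.1 == k) (K.map (Fent q)) = some (Fent q k) := by
    rw [List.find?_map]
    have hco : ((fun p => p.1 == k) ∘ Fent q) = (fun x => x == k) := by
      funext x; simp [Fent]
    rw [hco, ha, hak]
    rfl
  simp [PySem.Dict.getD, PySem.Dict.get?, hfind, Fent]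

lemma find?_map_Fent_not_mem (K q : List String) (k : String) (hk : k ∉ K) :
    List.find? (fun p => p.1 == k) (K.map (Fent q)) = none := by
  rw [List.find?_map]
  have : List.find? ((fun p => p.1 == k) ∘ Fent q) K = none := by
    rw [List.find?_eq_none]
    intro x hx
    simp only [Function.comp, Fent, beq_iff_eq, Bool.not_eq_true]
    rintro rfl; exact hk hx
  rw [this]; rfl

-- stepping the dict when the key is already present
lemma stepA_mem (K q : List String) (w : String) (hk : gkey w ∈ K) :
    (stepA (PySem.Dict.mk (K.map (Fent q))) w).items = K.map (Fent (q ++ [w])) := by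
  have hc : (PySem.Dict.mk (K.map (Fent q))).contains (gkey w) = true := by
    rw [contains_map_Fent, List.contains_iff_mem]; exact hk
  simp only [stepA, hc, if_true, PySem.Dict.modify, PySem.Dict.insert,
    getD_map_Fent_mem K q (gkey w) hk, PySem.Dict.items, List.map_map]
  apply List.map_congr_left
  intro k' _
  by_cases h : k' = gkey w
  · subst h
    simp [Fent, Function.comp, List.filter_append]
  · have h1 : (k' == gkey w) = false := beq_eq_false_iff_ne.mpr h
    have h2 : (gkey w == k') = false := beq_eq_false_iff_ne.mpr (Ne.symm h)
    simp [Fent, Function.comp, List.filter_append, h1, h2]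

-- stepping the dict when the key is new
lemma stepA_not_mem (K q : List String) (w : String) (hk : gkey w ∉ K)
    (hq : q.filter (fun word => gkey word == gkey w) = []) :
    (stepA (PySem.Dict.mk (K.map (Fent q))) w).items = (K ++ [gkey w]).map (Fent (q ++ [w])) := by
  have hc : (PySem.Dict.mk (K.map (Fent q))).contains (gkey w) = false := by
    rw [contains_map_Fent]
    rw [Bool.eq_false_iff]
    intro hcon
    exact hk (List.contains_iff_mem.mp hcon)
  have hfind := find?_map_Fent_not_mem K q (gkey w) hk
  have hany : ((K.map (Fent q)).any fun p => p.1 == gkey w) = false := by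
    have h2 := contains_map_Fent K q (gkey w)
    simp only [PySem.Dict.contains, PySem.Dict.items] at h2
    rw [h2, Bool.eq_false_iff]
    intro hcon
    exact hk (List.contains_iff_mem.mp hcon)
  simp only [stepA, hc, Bool.false_eq_true, if_false, PySem.Dict.modify, PySem.Dict.insert,
    PySem.Dict.contains, PySem.Dict.items, PySem.Dict.getD, PySem.Dict.get?,
    List.any_append, List.find?_append, hfind, hany, List.any_cons, List.any_nil,
    beq_self_eq_true, Bool.true_or, Bool.false_or, if_true, List.find?_cons_of_pos,
    Option.map_some, Option.getD_some, List.map_append, List.map_map, Option.map_none,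
    Option.getD_none, List.nil_append, List.map_cons, List.map_nil]
  simp only [Option.none_or, Option.map_some, Option.getD_some, List.nil_append]
  congr 1
  · apply List.map_congr_left
    intro k' hk'
    have hne : k' ≠ gkey w := by rintro rfl; exact hk hk'
    have h1 : (k' == gkey w) = false := beq_eq_false_iff_ne.mpr hne
    have h2 : (gkey w == k') = false := beq_eq_false_iff_ne.mpr (Ne.symm hne)
    simp [Fent, Function.comp, List.filter_append, h1, h2]
  · simp [Fent, List.filter_append, hq]

lemma dedup_append_singleton (m : List String) (k : String) :
    PySem.List.dedup (m ++ [k]) = PySem.Set.add (PySem.List.dedup m) k := by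
  simp only [PySem.List.dedup, PySem.Set.ofList, List.foldl_append, List.foldl_cons,
    List.foldl_nil]

-- main invariant: A's dict after processing prefix q is B's table for q
lemma foldl_stepA (q : List String) :
    (q.foldl stepA (PySem.Dict.empty : PySem.Dict String (List String))).items
      = (PySem.List.dedup (q.map gkey)).map (Fent q) := by
  induction q using List.reverseRecOn with
  | nil => simp [PySem.Dict.empty, PySem.List.dedup, PySem.Set.ofList, PySem.Set.empty]
  | append_singleton q w ih =>
    rw [List.foldl_append, List.foldl_cons, List.foldl_nil]
    set K := PySem.List.dedup (q.map gkey) with hK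
    have hd : q.foldl stepA PySem.Dict.empty = PySem.Dict.mk (K.map (Fent q)) := by
      cases h : q.foldl stepA (PySem.Dict.empty : PySem.Dict String (List String)) with
      | mk items => simp only [h] at ih; rw [ih]
    have hsplit : (q ++ [w]).map gkey = q.map gkey ++ [gkey w] := by simp
    rw [hd, hsplit, dedup_append_singleton, ← hK]
    by_cases hmem : gkey w ∈ K
    · have hKc : K.contains (gkey w) = true := List.contains_iff_mem.mpr hmem
      rw [PySem.Set.add, if_pos (show PySem.Set.contains K (gkey w) = true from hKc)]
      exact stepA_mem K q w hmem
    · have hKc : K.contains (gkey w) = false := by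
        rw [Bool.eq_false_iff]; intro hcon; exact hmem (List.contains_iff_mem.mp hcon)
      rw [PySem.Set.add, if_neg (show ¬ PySem.Set.contains K (gkey w) = true by
        simp only [PySem.Set.contains, hKc]; exact fun h => nomatch h)]
      apply stepA_not_mem K q w hmem
      rw [List.filter_eq_nil_iff]
      intro a ha
      have hmap : gkey a ∈ q.map gkey := List.mem_map_of_mem ha
      have hnq : gkey w ∉ q.map gkey := fun hq2 =>
        hmem ((PySem.List.mem_dedup (q.map gkey) (gkey w)).mpr hq2)
      simp only [beq_iff_eq, Bool.not_eq_true]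
      intro he
      exact hnq (he ▸ hmap)

-- ===== VERDICT (by name: the statement is the Claim_ definition above) =====
theorem group_by_first_two_letters_spec : Claim_equal_group_by_first_two_letters := by
  intro words _
  unfold Spec_group_by_first_two_letters group_by_first_two_letters group_by_first_two_letters_alt
  have := foldl_stepA words
  simpa [stepA, Fent] using this
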